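-- pv_equiv track=rewrite | github.com/BojanUSI/Python-Algorithms | Assignment/ex3.py | equal_sum_seq
-- ===== SOURCE A (Python) =====
-- def equal_sum_seq(A):
--
--     X = []
--
--     for i in range(len(A)):
--         sum = 0
--         u = A[i]
--         for j in range(i, len(A)):
--             sum += A[j]
--             for x in X:
--                 if x == sum:
--                     return True
--             X.append(sum)
--     return False
-- ===== SOURCE B (Python) =====
-- def equal_sum_seq(A):
--     # Prefix sums: every contiguous subarray sum is P[j] - P[i] with i < j.
--     P = [0]
--     for a in A:
--         P.append(P[-1] + a)
--     # All pairwise differences P[j] - P[i], i < j.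
--     sums = [P[j] - P[i] for i in range(len(P)) for j in range(i + 1, len(P))]
--     # Sort and look for an adjacent equal pair.
--     sums.sort()
--     for k in range(1, len(sums)):
--         if sums[k - 1] == sums[k]:
--             return True
--     return False
-- ===== Notes on version B (the rewrite author's own statement) =====
-- stated objective: alternative
-- what changed: Replaces A's incremental generate-and-scan (each running subarray sum linearly scanned against all previous ones with early return) by prefix sums: build the prefix-sum array once, form all pairwise differences P[j]-P[i], sort them, and detect a duplicate as an adjacent equal pair in the sorted order.
import Mathlib
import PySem

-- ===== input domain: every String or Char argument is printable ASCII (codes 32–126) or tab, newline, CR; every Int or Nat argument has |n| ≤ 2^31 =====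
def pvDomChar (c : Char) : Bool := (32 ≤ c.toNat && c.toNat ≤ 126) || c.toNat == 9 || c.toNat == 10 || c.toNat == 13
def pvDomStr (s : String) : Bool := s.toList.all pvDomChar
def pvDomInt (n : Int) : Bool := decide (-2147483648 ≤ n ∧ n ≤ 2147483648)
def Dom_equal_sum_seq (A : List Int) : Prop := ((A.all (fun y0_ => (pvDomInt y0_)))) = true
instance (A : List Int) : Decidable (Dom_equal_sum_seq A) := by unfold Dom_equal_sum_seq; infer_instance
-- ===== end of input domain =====

-- B replaces A's incremental generate-and-scan (each running subarray sum linearly scanned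
-- against all previous ones, with early return) by a prefix-sum algorithm: build the prefix
-- sums, form all pairwise differences P[j]-P[i], sort them, and report a duplicate iff some
-- adjacent pair of the sorted list is equal (alternative algorithm, same n^2-sized stream).


-- ===== PORT A =====
-- 'for x in X: if x == sum: return True' — linear scan with early return
def pvScanA (X : List Int) (s : Int) : Bool :=
  match X with
  | [] => false
  | x :: xs => if x == s then true else pvScanA xs s

-- inner j-loop over the remaining suffix A[j:]: accumulates sum, scans X, appends;
-- 'none' = the early 'return True' fired, 'some X'' = loop finished with X = X'
def pvInnerA (L : List Int) (sum : Int) (X : List Int) : Option (List Int) :=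
  match L with
  | [] => some X
  | a :: rest =>
    if pvScanA X (sum + a) then none
    else pvInnerA rest (sum + a) (X ++ [sum + a])

-- outer i-loop, one suffix of A per iteration (the unused 'u = A[i]' binds nothing)
def pvOuterA (L : List Int) (X : List Int) : Bool :=
  match L with
  | [] => false
  | _ :: rest =>
    match pvInnerA L 0 X with
    | none => true
    | some X' => pvOuterA rest X'

def equal_sum_seq (A : List Int) : Bool := pvOuterA A []

-- ===== PORT B =====
-- 'P = [0]; for a in A: P.append(P[-1] + a)' — the prefix sums, carrying the last element
def pvPrefixes (L : List Int) (s : Int) : List Int :=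
  match L with
  | [] => [s]
  | a :: rest => s :: pvPrefixes rest (s + a)

-- '[P[j] - P[i] for i in range(len(P)) for j in range(i+1, len(P))]'
def pvPairDiffs (P : List Int) : List Int :=
  match P with
  | [] => []
  | p :: rest => rest.map (fun q => q - p) ++ pvPairDiffs rest

-- 'for k in range(1, len(sums)): if sums[k-1] == sums[k]: return True' on the sorted list
def pvAdjDup (L : List Int) : Bool :=
  match L with
  | [] => false
  | [_] => false
  | a :: b :: rest => if a == b then true else pvAdjDup (b :: rest)

def equal_sum_seq_alt (A : List Int) : Bool :=
  pvAdjDup (PySem.List.sorted (pvPairDiffs (pvPrefixes A 0)) (fun x => x) false)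

-- ===== PRECONDITION & SPEC =====
def Spec_equal_sum_seq (A : List Int) (out : Bool) : Prop := out = equal_sum_seq_alt A
instance (A : List Int) (out : Bool) : Decidable (Spec_equal_sum_seq A out) := by unfold Spec_equal_sum_seq; infer_instance

-- ===== CLAIM (what is proved, stated in full; the proofs are below) =====
def Claim_equal_equal_sum_seq : Prop := ∀ (A : List Int), Dom_equal_sum_seq A → Spec_equal_sum_seq A (equal_sum_seq A)

-- ===== LEMMAS AND PROOFS =====

-- A's candidate sums, in A's generation order: running sums of each suffix
def pvSumsFrom (L : List Int) (s : Int) : List Int :=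
  match L with
  | [] => []
  | a :: rest => (s + a) :: pvSumsFrom rest (s + a)

def pvAllSums (L : List Int) : List Int :=
  match L with
  | [] => []
  | _ :: rest => pvSumsFrom L 0 ++ pvAllSums rest

-- A's check-then-append process, flattened over a stream of candidate sums
def pvProc (L : List Int) (X : List Int) : Bool :=
  match L with
  | [] => false
  | s :: rest => if pvScanA X s then true else pvProc rest (X ++ [s])

theorem pvScanA_eq (X : List Int) (s : Int) : pvScanA X s = decide (s ∈ X) := by
  induction X with
  | nil => simp [pvScanA]
  | cons x xs ih =>
    simp only [pvScanA, ih, List.mem_cons]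
    by_cases h : x = s
    · subst h; simp
    · have h2 : ¬ s = x := fun he => h he.symm
      simp [h, h2]

theorem pvInnerA_eq (L : List Int) : ∀ (sum : Int) (X : List Int),
    pvInnerA L sum X =
      if pvProc (pvSumsFrom L sum) X then none else some (X ++ pvSumsFrom L sum) := by
  induction L with
  | nil => intro sum X; simp [pvInnerA, pvSumsFrom, pvProc]
  | cons a rest ih =>
    intro sum X
    simp only [pvInnerA, pvSumsFrom, pvProc]
    by_cases h : pvScanA X (sum + a) = true
    · simp [h]
    · simp [h, ih, List.append_assoc]

theorem pvProc_append (S T X : List Int) :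
    pvProc (S ++ T) X = (pvProc S X || pvProc T (X ++ S)) := by
  induction S generalizing X with
  | nil => simp [pvProc]
  | cons s rest ih =>
    simp only [List.cons_append, pvProc]
    by_cases h : pvScanA X s = true
    · simp [h]
    · simp [h, ih, List.append_assoc]

theorem pvOuterA_eq (L : List Int) : ∀ (X : List Int),
    pvOuterA L X = pvProc (pvAllSums L) X := by
  induction L with
  | nil => intro X; simp [pvOuterA, pvAllSums, pvProc]
  | cons a rest ih =>
    intro X
    simp only [pvOuterA, pvAllSums, pvInnerA_eq, pvProc_append]
    by_cases h : pvProc (pvSumsFrom (a :: rest) 0) X = true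
    · simp [h]
    · simp [h, ih]

theorem pvProc_true_iff (L : List Int) : ∀ (X : List Int), X.Nodup →
    (pvProc L X = true ↔ ¬ (X ++ L).Nodup) := by
  induction L with
  | nil => intro X hX; simp [pvProc, hX]
  | cons s rest ih =>
    intro X hX
    simp only [pvProc, pvScanA_eq]
    by_cases h : s ∈ X
    · simp only [h, decide_true, if_true, true_iff]
      intro hnd
      rw [List.nodup_append] at hnd
      exact hnd.2.2 s h s List.mem_cons_self rfl
    · have hX' : (X ++ [s]).Nodup := by
        refine List.Nodup.append hX (List.nodup_singleton s) ?_
        intro a ha hb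
        rw [List.mem_singleton] at hb
        exact h (hb ▸ ha)
      simp only [h, decide_false, Bool.false_eq_true, if_false]
      rw [ih (X ++ [s]) hX']
      simp [List.append_assoc]

-- equal_sum_seq is the duplicate test on the stream pvAllSums
theorem equal_sum_seq_iff (A : List Int) :
    equal_sum_seq A = true ↔ ¬ (pvAllSums A).Nodup := by
  unfold equal_sum_seq
  rw [pvOuterA_eq]
  have h := pvProc_true_iff (pvAllSums A) [] List.nodup_nil
  simpa using h

-- ----- B side -----

theorem pvPrefixes_eq_cons (L : List Int) : ∀ (s : Int),
    pvPrefixes L s = s :: pvSumsFrom L s := by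
  induction L with
  | nil => intro s; simp [pvPrefixes, pvSumsFrom]
  | cons a rest ih => intro s; simp [pvPrefixes, pvSumsFrom, ih]

theorem pvPrefixes_shift (L : List Int) : ∀ (s c : Int),
    pvPrefixes L (s + c) = (pvPrefixes L s).map (fun x => x + c) := by
  induction L with
  | nil => intro s c; simp [pvPrefixes]
  | cons a rest ih =>
    intro s c
    simp only [pvPrefixes, List.map_cons]
    have : s + c + a = s + a + c := by ring
    rw [this, ih]

theorem pvPairDiffs_map_add (xs : List Int) (c : Int) :
    pvPairDiffs (xs.map (fun x => x + c)) = pvPairDiffs xs := by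
  induction xs with
  | nil => simp [pvPairDiffs]
  | cons p rest ih =>
    simp only [List.map_cons, pvPairDiffs, ih, List.map_map]
    congr 1
    apply List.map_congr_left
    intro q _
    simp only [Function.comp_apply]
    ring

theorem pvPairDiffs_prefixes_shift (L : List Int) (s : Int) :
    pvPairDiffs (pvPrefixes L s) = pvPairDiffs (pvPrefixes L 0) := by
  have h : pvPrefixes L s = pvPrefixes L (0 + s) := by rw [Int.zero_add]
  rw [h, pvPrefixes_shift, pvPairDiffs_map_add]

theorem pvPairDiffs_perm (L : List Int) :
    (pvPairDiffs (pvPrefixes L 0)).Perm (pvAllSums L) := by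
  induction L with
  | nil => simp [pvPrefixes, pvPairDiffs, pvAllSums]
  | cons a rest ih =>
    have hpre : pvPrefixes (a :: rest) 0 = 0 :: pvPrefixes rest (0 + a) := rfl
    rw [hpre]
    simp only [pvPairDiffs]
    have hmap : (pvPrefixes rest (0 + a)).map (fun q => q - 0) = pvPrefixes rest (0 + a) := by
      apply List.map_congr_left ?_ |>.trans (List.map_id _)
      intro q _; simp
    have hsum : pvPrefixes rest (0 + a) = pvSumsFrom (a :: rest) 0 := by
      rw [pvPrefixes_eq_cons]; simp [pvSumsFrom]
    rw [hmap, pvPairDiffs_prefixes_shift, hsum]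
    show (pvSumsFrom (a :: rest) 0 ++ pvPairDiffs (pvPrefixes rest 0)).Perm
        (pvSumsFrom (a :: rest) 0 ++ pvAllSums rest)
    exact (ih.append_left _)

-- an adjacent equal pair exists in a (≤)-sorted list iff the list has a duplicate
theorem pvAdjDup_iff (xs : List Int) (hp : xs.Pairwise (· ≤ ·)) :
    pvAdjDup xs = true ↔ ¬ xs.Nodup := by
  induction xs with
  | nil => simp [pvAdjDup]
  | cons a tail ih =>
    cases tail with
    | nil => simp [pvAdjDup]
    | cons b rest =>
      rcases List.pairwise_cons.mp hp with ⟨ha, hp'⟩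
      by_cases hab : a = b
      · subst hab
        simp [pvAdjDup, List.nodup_cons]
      · have hnm : a ∉ b :: rest := by
          intro hmem
          rcases List.mem_cons.mp hmem with h | h
          · exact hab h
          · have h1 : a ≤ b := ha b List.mem_cons_self
            have h2 : b ≤ a := (List.pairwise_cons.mp hp').1 a h
            exact hab (le_antisymm h1 h2)
        have hd : pvAdjDup (a :: b :: rest) = pvAdjDup (b :: rest) := by
          simp [pvAdjDup, hab]
        rw [hd, ih hp', List.nodup_cons]
        simp [hnm]

-- ===== VERDICT (by name: the statement is the Claim_ definition above) =====
theorem equal_sum_seq_spec : Claim_equal_equal_sum_seq := by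
  intro A _
  unfold Spec_equal_sum_seq equal_sum_seq_alt
  rw [Bool.eq_iff_iff, equal_sum_seq_iff]
  set S := pvPairDiffs (pvPrefixes A 0) with hS
  have hsortperm : (PySem.List.sorted S (fun x => x) false).Perm S :=
    PySem.List.sorted_perm S (fun x => x) false
  have hpw : (PySem.List.sorted S (fun x => x) false).Pairwise (· ≤ ·) := by
    have := PySem.List.sorted_pairwise (xs := S) (key := fun x => x)
    simpa using this
  rw [pvAdjDup_iff _ hpw]
  have hperm : (PySem.List.sorted S (fun x => x) false).Perm (pvAllSums A) :=
    hsortperm.trans (pvPairDiffs_perm A)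
  rw [hperm.nodup_iff]
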